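-- pv_equiv track=rewrite | github.com/AtharEzz/Use-a-Pre-trained-Image-Classifier-to-Identify-Dog-Breeds-project | data/calculates_results_stats.py | counts_computed
-- ===== SOURCE A (Python) =====
-- def counts_computed (results_dic):
--     n_correct_dogs = 0
--     n_dogs_img = 0
--     n_correct_notdogs = 0
--     n_notdogs_img=0
--     n_correct_breed =0
--     n_match=0
--     counts=[]
--
--     for value in results_dic.values():
--
--         if(value[3]==1 and value[4]==1):
--                 n_correct_dogs+=1
--
--         if(value[3]==1):
--                 n_dogs_img+=1
--
--
--         if(value[3]==0 and value[4]==0):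
--                 n_correct_notdogs+=1
--
--
--         if(value[3]==0):
--                 n_notdogs_img+=1
--
--
--         if(value[3]==1 and value[2]==1):
--                 n_correct_breed+=1
--
--
--         if(value[2]==1):
--                 n_match+=1
--
--     counts.append(n_correct_dogs)
--     counts.append(n_dogs_img)
--     counts.append(n_correct_notdogs)
--     counts.append(n_notdogs_img)
--     counts.append(n_correct_breed)
--     counts.append( n_match)
--
--
--
--
--     return counts
-- ===== SOURCE B (Python) =====
-- def counts_computed(results_dic):
--     vals = list(results_dic.values())
--     n_correct_dogs = sum(1 for v in vals if v[3] == 1 and v[4] == 1)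
--     n_dogs_img = sum(1 for v in vals if v[3] == 1)
--     n_correct_notdogs = sum(1 for v in vals if v[3] == 0 and v[4] == 0)
--     n_notdogs_img = sum(1 for v in vals if v[3] == 0)
--     n_correct_breed = sum(1 for v in vals if v[3] == 1 and v[2] == 1)
--     n_match = sum(1 for v in vals if v[2] == 1)
--     return [n_correct_dogs, n_dogs_img, n_correct_notdogs,
--             n_notdogs_img, n_correct_breed, n_match]
-- ===== Notes on version B (the rewrite author's own statement) =====
-- stated objective: simpler
-- what changed: Replaces the single fused loop with six mutable counters by six independent full scans (one sum-comprehension per statistic) over the values, assembled into the result list directly.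
import Mathlib
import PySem

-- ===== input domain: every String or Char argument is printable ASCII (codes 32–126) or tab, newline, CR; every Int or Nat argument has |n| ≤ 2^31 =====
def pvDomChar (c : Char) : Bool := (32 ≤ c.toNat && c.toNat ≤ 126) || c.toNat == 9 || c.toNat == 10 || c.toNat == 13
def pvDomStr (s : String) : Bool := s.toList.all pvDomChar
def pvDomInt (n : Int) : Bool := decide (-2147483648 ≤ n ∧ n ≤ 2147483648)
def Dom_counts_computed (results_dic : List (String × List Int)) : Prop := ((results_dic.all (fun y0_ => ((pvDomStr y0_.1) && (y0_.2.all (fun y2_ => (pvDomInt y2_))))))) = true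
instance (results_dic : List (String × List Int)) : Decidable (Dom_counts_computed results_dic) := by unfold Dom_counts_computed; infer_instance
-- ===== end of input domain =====

-- B replaces A's single fused loop with six mutable counters by six independent
-- counting scans over the values (objective: simpler decomposition).
-- ===== PORT A =====
-- Port of A: one fused pass carrying six counters; value[i] via pyGet? (IndexError excluded by Pre_).
def counts_computed (results_dic : List (String × List Int)) : List Int :=
  let st := results_dic.foldl (fun (s : Int × Int × Int × Int × Int × Int) kv =>
    let v := kv.2
    let s1 := if PySem.List.pyGet? v 3 == some 1 && PySem.List.pyGet? v 4 == some 1 then s.1 + 1 else s.1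
    let s2 := if PySem.List.pyGet? v 3 == some 1 then s.2.1 + 1 else s.2.1
    let s3 := if PySem.List.pyGet? v 3 == some 0 && PySem.List.pyGet? v 4 == some 0 then s.2.2.1 + 1 else s.2.2.1
    let s4 := if PySem.List.pyGet? v 3 == some 0 then s.2.2.2.1 + 1 else s.2.2.2.1
    let s5 := if PySem.List.pyGet? v 3 == some 1 && PySem.List.pyGet? v 2 == some 1 then s.2.2.2.2.1 + 1 else s.2.2.2.2.1
    let s6 := if PySem.List.pyGet? v 2 == some 1 then s.2.2.2.2.2 + 1 else s.2.2.2.2.2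
    (s1, s2, s3, s4, s5, s6)) (0, 0, 0, 0, 0, 0)
  [st.1, st.2.1, st.2.2.1, st.2.2.2.1, st.2.2.2.2.1, st.2.2.2.2.2]

-- ===== PORT B =====
-- B-side helper: one full scan counting the values satisfying p (sum(1 for v in vals if p(v))).
def pvCount (p : List Int → Bool) (results_dic : List (String × List Int)) : Int :=
  ((results_dic.map Prod.snd).countP p : Nat)

def counts_computed_alt (results_dic : List (String × List Int)) : List Int :=
  [ pvCount (fun v => PySem.List.pyGet? v 3 == some 1 && PySem.List.pyGet? v 4 == some 1) results_dic,
    pvCount (fun v => PySem.List.pyGet? v 3 == some 1) results_dic,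
    pvCount (fun v => PySem.List.pyGet? v 3 == some 0 && PySem.List.pyGet? v 4 == some 0) results_dic,
    pvCount (fun v => PySem.List.pyGet? v 3 == some 0) results_dic,
    pvCount (fun v => PySem.List.pyGet? v 3 == some 1 && PySem.List.pyGet? v 2 == some 1) results_dic,
    pvCount (fun v => PySem.List.pyGet? v 2 == some 1) results_dic ]

-- ===== PRECONDITION & SPEC =====
-- Pre_ excludes exactly the inputs where A raises IndexError: a value list shorter than 4,
-- or shorter than 5 when its element 3 is 0 or 1 (Python's 'and' short-circuits, so value[4]
-- is only read in that case).
def Pre_counts_computed (results_dic : List (String × List Int)) : Prop :=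
  ∀ kv ∈ results_dic, 4 ≤ kv.2.length ∧
    ((PySem.List.pyGet? kv.2 3 = some 0 ∨ PySem.List.pyGet? kv.2 3 = some 1) → 5 ≤ kv.2.length)
instance (results_dic : List (String × List Int)) : Decidable (Pre_counts_computed results_dic) := by
  unfold Pre_counts_computed; infer_instance
def pvWitness_counts_computed : (List (String × List Int)) := [("dog.jpg", [0, 0, 1, 1, 1])]

def Spec_counts_computed (results_dic : List (String × List Int)) (out : List Int) : Prop := out = counts_computed_alt results_dic
instance (results_dic : List (String × List Int)) (out : List Int) : Decidable (Spec_counts_computed results_dic out) := by unfold Spec_counts_computed; infer_instance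

-- ===== CLAIM (what is proved, stated in full; the proofs are below) =====
def Claim_equal_counts_computed : Prop := ∀ (results_dic : List (String × List Int)), Dom_counts_computed results_dic → Pre_counts_computed results_dic → Spec_counts_computed results_dic (counts_computed results_dic)

-- ===== LEMMAS AND PROOFS =====
lemma pvCount_cons (p : List Int → Bool) (kv : String × List Int) (r : List (String × List Int)) :
    pvCount p (kv :: r) = (if p kv.2 then 1 else 0) + pvCount p r := by
  simp only [pvCount, List.map_cons, List.countP_cons]
  split <;> push_cast <;> ring

lemma counts_loop (r : List (String × List Int)) (a b c d e f : Int) :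
    r.foldl (fun (s : Int × Int × Int × Int × Int × Int) kv =>
      let v := kv.2
      let s1 := if PySem.List.pyGet? v 3 == some 1 && PySem.List.pyGet? v 4 == some 1 then s.1 + 1 else s.1
      let s2 := if PySem.List.pyGet? v 3 == some 1 then s.2.1 + 1 else s.2.1
      let s3 := if PySem.List.pyGet? v 3 == some 0 && PySem.List.pyGet? v 4 == some 0 then s.2.2.1 + 1 else s.2.2.1
      let s4 := if PySem.List.pyGet? v 3 == some 0 then s.2.2.2.1 + 1 else s.2.2.2.1
      let s5 := if PySem.List.pyGet? v 3 == some 1 && PySem.List.pyGet? v 2 == some 1 then s.2.2.2.2.1 + 1 else s.2.2.2.2.1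
      let s6 := if PySem.List.pyGet? v 2 == some 1 then s.2.2.2.2.2 + 1 else s.2.2.2.2.2
      (s1, s2, s3, s4, s5, s6)) (a, b, c, d, e, f) =
    (a + pvCount (fun v => PySem.List.pyGet? v 3 == some 1 && PySem.List.pyGet? v 4 == some 1) r,
     b + pvCount (fun v => PySem.List.pyGet? v 3 == some 1) r,
     c + pvCount (fun v => PySem.List.pyGet? v 3 == some 0 && PySem.List.pyGet? v 4 == some 0) r,
     d + pvCount (fun v => PySem.List.pyGet? v 3 == some 0) r,
     e + pvCount (fun v => PySem.List.pyGet? v 3 == some 1 && PySem.List.pyGet? v 2 == some 1) r,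
     f + pvCount (fun v => PySem.List.pyGet? v 2 == some 1) r) := by
  induction r generalizing a b c d e f with
  | nil => simp [pvCount]
  | cons kv t ih =>
    simp only [List.foldl_cons]
    rw [ih]
    simp only [pvCount_cons]
    refine Prod.ext ?_ (Prod.ext ?_ (Prod.ext ?_ (Prod.ext ?_ (Prod.ext ?_ ?_)))) <;>
      simp only [] <;> split <;> ring

-- ===== VERDICT (by name: the statement is the Claim_ definition above) =====
theorem counts_computed_spec : Claim_equal_counts_computed := by
  intro r _ _
  unfold Spec_counts_computed counts_computed
  rw [counts_loop]
  simp [counts_computed_alt]
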